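-- pv_equiv track=rewrite | github.com/swostikaa99/AI_lab | lab_2/block_world_problem.py | heuristic_value
-- ===== SOURCE A (Python) =====
-- def heuristic_value(current, goal):
--     h_value = 0
--     for i in range(4):
--         if (current[i] == goal[i]):
--             h_value = h_value + i
--         else:
--             h_value = h_value - i
--
--     return h_value
-- ===== SOURCE B (Python) =====
-- def heuristic_value(current, goal):
--     pairs = [(current[i], goal[i]) for i in (0, 1, 2, 3)]
--
--     def go(ps, w):
--         if not ps:
--             return 0
--         a, b = ps[0]
--         return (w if a == b else -w) + go(ps[1:], w + 1)
--
--     return go(pairs, 0)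
-- ===== Notes on version B (the rewrite author's own statement) =====
-- stated objective: alternative
-- what changed: B first materialises the four (current[i], goal[i]) pairs into a list, then computes the value by structural recursion on that pair list (weight carried as an argument, sum formed on return), instead of A's single indexed loop with a branching add/subtract accumulator.
import Mathlib
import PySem

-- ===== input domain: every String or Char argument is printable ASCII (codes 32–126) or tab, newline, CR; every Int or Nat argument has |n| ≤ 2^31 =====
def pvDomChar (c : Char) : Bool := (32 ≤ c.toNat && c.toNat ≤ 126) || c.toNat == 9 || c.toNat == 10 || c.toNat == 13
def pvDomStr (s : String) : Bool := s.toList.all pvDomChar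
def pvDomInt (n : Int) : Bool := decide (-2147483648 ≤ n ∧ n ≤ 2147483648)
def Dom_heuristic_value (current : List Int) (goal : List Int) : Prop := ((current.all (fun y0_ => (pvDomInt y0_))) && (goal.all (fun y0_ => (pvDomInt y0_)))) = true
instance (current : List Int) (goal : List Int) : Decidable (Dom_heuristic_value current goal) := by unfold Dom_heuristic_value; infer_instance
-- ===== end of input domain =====

-- B builds the four (current[i], goal[i]) pairs into a list, then recurses over it (weight as an
-- argument, sum on return) instead of A's indexed loop with a branching accumulator; no speed claim.

-- ===== PORT A =====
-- Port of A: loop i in range(4), add i on match else subtract i; current[i]/goal[i] via pyGet?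
-- (none = IndexError, excluded by Pre_; the fallback branch is unreachable inside Pre_).
def heuristic_value (current : List Int) (goal : List Int) : Int :=
  (PySem.List.pyRange 0 4 1).foldl (fun h i =>
    match PySem.List.pyGet? current i, PySem.List.pyGet? goal i with
    | some a, some b => if a == b then h + i else h - i
    | _, _ => h) 0

-- ===== PORT B =====
-- Port of B's inner recursion go(ps, w): empty → 0, else head pair weighted by w plus go on the tail.
def hvGo : List (Int × Int) → Int → Int
  | [], _ => 0
  | (a, b) :: rest, w => (if a == b then w else -w) + hvGo rest (w + 1)

-- Port of B: pairs = [(current[i], goal[i]) for i in (0,1,2,3)]; go(pairs, 0).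
-- (pyGet? none = IndexError; the skipping branch is unreachable inside Pre_, where this is exact.)
def heuristic_value_alt (current : List Int) (goal : List Int) : Int :=
  hvGo (([0, 1, 2, 3] : List Int).filterMap (fun i =>
    (PySem.List.pyGet? current i).bind (fun a =>
      (PySem.List.pyGet? goal i).map (fun b => (a, b))))) 0

-- ===== PRECONDITION & SPEC =====
-- Pre_ excludes exactly the inputs where the Python A raises IndexError (a list shorter than 4).
def Pre_heuristic_value (current : List Int) (goal : List Int) : Prop :=
  4 ≤ current.length ∧ 4 ≤ goal.length
instance (current : List Int) (goal : List Int) : Decidable (Pre_heuristic_value current goal) := by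
  unfold Pre_heuristic_value; infer_instance
def pvWitness_heuristic_value : List Int × List Int := ([1, 2, 3, 4], [1, 0, 3, 0])

def Spec_heuristic_value (current : List Int) (goal : List Int) (out : Int) : Prop := out = heuristic_value_alt current goal
instance (current : List Int) (goal : List Int) (out : Int) : Decidable (Spec_heuristic_value current goal out) := by unfold Spec_heuristic_value; infer_instance

-- ===== CLAIM (what is proved, stated in full; the proofs are below) =====
def Claim_equal_heuristic_value : Prop := ∀ (current : List Int) (goal : List Int), Dom_heuristic_value current goal → Pre_heuristic_value current goal → Spec_heuristic_value current goal (heuristic_value current goal)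

-- ===== LEMMAS AND PROOFS =====

-- ===== VERDICT (by name: the statement is the Claim_ definition above) =====
theorem heuristic_value_spec : Claim_equal_heuristic_value := by
  intro current goal _ hpre
  obtain ⟨hc, hg⟩ := hpre
  rcases current with _ | ⟨c0, _ | ⟨c1, _ | ⟨c2, _ | ⟨c3, ct⟩⟩⟩⟩ <;> simp at hc
  rcases goal with _ | ⟨g0, _ | ⟨g1, _ | ⟨g2, _ | ⟨g3, gt⟩⟩⟩⟩ <;> simp at hg
  have hr : PySem.List.pyRange 0 4 1 = [0, 1, 2, 3] := by decide
  have p0 : PySem.List.pyGet? (c0::c1::c2::c3::ct) 0 = some c0 := by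
    rw [show (0:Int) = ((0:Nat):Int) from rfl, PySem.List.pyGet?_natCast]; simp
  have p1 : PySem.List.pyGet? (c0::c1::c2::c3::ct) 1 = some c1 := by
    rw [show (1:Int) = ((1:Nat):Int) from rfl, PySem.List.pyGet?_natCast]; simp
  have p2 : PySem.List.pyGet? (c0::c1::c2::c3::ct) 2 = some c2 := by
    rw [show (2:Int) = ((2:Nat):Int) from rfl, PySem.List.pyGet?_natCast]; simp
  have p3 : PySem.List.pyGet? (c0::c1::c2::c3::ct) 3 = some c3 := by
    rw [show (3:Int) = ((3:Nat):Int) from rfl, PySem.List.pyGet?_natCast]; simp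
  have q0 : PySem.List.pyGet? (g0::g1::g2::g3::gt) 0 = some g0 := by
    rw [show (0:Int) = ((0:Nat):Int) from rfl, PySem.List.pyGet?_natCast]; simp
  have q1 : PySem.List.pyGet? (g0::g1::g2::g3::gt) 1 = some g1 := by
    rw [show (1:Int) = ((1:Nat):Int) from rfl, PySem.List.pyGet?_natCast]; simp
  have q2 : PySem.List.pyGet? (g0::g1::g2::g3::gt) 2 = some g2 := by
    rw [show (2:Int) = ((2:Nat):Int) from rfl, PySem.List.pyGet?_natCast]; simp
  have q3 : PySem.List.pyGet? (g0::g1::g2::g3::gt) 3 = some g3 := by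
    rw [show (3:Int) = ((3:Nat):Int) from rfl, PySem.List.pyGet?_natCast]; simp
  unfold Spec_heuristic_value heuristic_value heuristic_value_alt
  rw [hr]
  simp only [List.foldl_cons, List.foldl_nil, List.filterMap_cons, List.filterMap_nil,
    p0, p1, p2, p3, q0, q1, q2, q3, Option.bind_some, Option.map_some]
  cases h0 : c0 == g0 <;> cases h1 : c1 == g1 <;> cases h2 : c2 == g2 <;>
    cases h3 : c3 == g3 <;> simp [h0, h1, h2, h3, hvGo]
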